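-- pv_equiv track=rewrite | github.com/Jh-jaehyuk/BOJ | BOJ/30000++/31000~/31813.py | solve
-- ===== SOURCE A (Python) =====
-- def solve(n, k):
--     ans = []
--     while n > 0:
--         s = str(n)[0]
--         ss = len(str(n))
--         x = int(s * ss)
--         if x <= n:
--             n -= x
--             ans.append(x)
--         else:
--             s = int(str(n)[0]) - 1
--             if not s:
--                 s = 9
--                 ss -= 1
--             s = str(s)
--             n -= int(s * ss)
--             ans.append(int(s * ss))
--     return ans
-- ===== SOURCE B (Python) =====
-- def solve(n, k):
--     if n <= 0:
--         return []
--     ans = []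
--     for L in range(len(str(n)), 0, -1):
--         rep = (10 ** L - 1) // 9
--         for d in range(9, 0, -1):
--             r = d * rep
--             if r <= n:
--                 n -= r
--                 ans.append(r)
--     return ans
-- ===== Notes on version B (the rewrite author's own statement) =====
-- stated objective: simpler
-- what changed: A recomputes str(n) each iteration, reads its leading digit and length, and handles a borrow case (leading digit minus one, or all nines one digit shorter); B instead enumerates every repdigit candidate d*(10**L-1)//9 from the largest length down to 1 in one descending pass, subtracting each candidate that fits, with no per-step string work and no borrow branch.
import Mathlib
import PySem

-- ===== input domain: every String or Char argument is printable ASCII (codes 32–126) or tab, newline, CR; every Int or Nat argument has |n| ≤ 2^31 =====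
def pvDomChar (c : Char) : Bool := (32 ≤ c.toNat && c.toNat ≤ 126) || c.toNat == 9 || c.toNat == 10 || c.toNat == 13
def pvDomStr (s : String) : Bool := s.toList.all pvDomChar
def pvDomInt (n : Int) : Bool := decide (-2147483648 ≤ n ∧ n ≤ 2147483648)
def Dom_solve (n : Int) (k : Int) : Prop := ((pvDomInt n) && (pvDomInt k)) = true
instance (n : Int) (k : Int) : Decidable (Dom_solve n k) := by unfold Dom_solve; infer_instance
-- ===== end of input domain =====

-- B replaces A's per-step leading-digit/borrow computation on str(n) with a single
-- descending scan over all repdigit candidates; objective: simpler (same exact results).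

-- ===== PORT A =====
-- the while loop of A; fuel only makes the recursion structural (one unit per iteration,
-- n.toNat + 1 always suffices since each iteration decreases n by at least 1)
def solveLoop (fuel : Nat) (n : Int) (ans : List Int) : List Int :=
  match fuel with
  | 0 => ans
  | fuel + 1 =>
    if n > 0 then
      let cs := PySem.Int.toChars n                       -- str(n)
      match PySem.List.pyGet? cs 0 with                   -- s = str(n)[0]
      | none => ans                                       -- unreachable: str(n) of a positive n is nonempty
      | some c =>
        let ss : Int := (cs.length : Int)                 -- ss = len(str(n))
        let x := (PySem.Int.ofChars? (PySem.List.pyRepeat [c] ss)).getD 0    -- x = int(s * ss)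
        if x ≤ n then
          solveLoop fuel (n - x) (ans ++ [x])
        else
          let s1 := (PySem.Int.ofChars? [c]).getD 0 - 1   -- s = int(str(n)[0]) - 1
          let p := if s1 = 0 then ((9 : Int), ss - 1) else (s1, ss)
          let y := (PySem.Int.ofChars? (PySem.List.pyRepeat (PySem.Int.toChars p.1) p.2)).getD 0
          solveLoop fuel (n - y) (ans ++ [y])
    else ans

def solve (n : Int) (k : Int) : List Int := solveLoop (n.toNat + 1) n []

-- ===== PORT B =====
def solve_alt (n : Int) (k : Int) : List Int :=
  if n ≤ 0 then []
  else
    ((PySem.List.pyRange ((PySem.Int.toChars n).length : Int) 0 (-1)).foldl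
      (fun st L =>
        let rep := PySem.Int.floordiv (10 ^ L.toNat - 1) 9
        (PySem.List.pyRange 9 0 (-1)).foldl
          (fun st d =>
            let r := d * rep
            if r ≤ st.1 then (st.1 - r, st.2 ++ [r]) else st)
          st)
      (n, ([] : List Int))).2


-- ===== PRECONDITION & SPEC =====
def Spec_solve (n : Int) (k : Int) (out : List Int) : Prop := out = solve_alt n k
instance (n : Int) (k : Int) (out : List Int) : Decidable (Spec_solve n k out) := by unfold Spec_solve; infer_instance

-- ===== CLAIM (what is proved, stated in full; the proofs are below) =====
def Claim_equal_solve : Prop := ∀ (n : Int) (k : Int), Dom_solve n k → Spec_solve n k (solve n k)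

-- ===== LEMMAS AND PROOFS =====

def repu : Nat → Int
  | 0 => 0
  | L + 1 => 10 * repu L + 1

def rd (d : Int) (L : Nat) : Int := d * repu L

lemma ten_pow_pos (L : Nat) : (1:Int) ≤ 10 ^ L := one_le_pow₀ (by norm_num)

lemma nine_repu (L : Nat) : 9 * repu L = 10 ^ L - 1 := by
  induction L with
  | zero => simp [repu]
  | succ L ih => simp [repu, pow_succ]; ring_nf; ring_nf at ih; omega

lemma repu_nonneg (L : Nat) : 0 ≤ repu L := by
  have := nine_repu L
  have := ten_pow_pos L
  omega

lemma repu_pos {L : Nat} (h : 1 ≤ L) : 1 ≤ repu L := by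
  obtain ⟨L', rfl⟩ := Nat.exists_eq_add_of_le h
  have := repu_nonneg (L' : Nat)
  show 1 ≤ repu (1 + L')
  rw [Nat.add_comm]
  simp [repu]
  omega

lemma pow_le_repu {L : Nat} (h : 1 ≤ L) : (10:Int) ^ (L - 1) ≤ repu L := by
  have h1 := nine_repu L
  have h2 : (10:Int) ^ L = 10 * 10 ^ (L-1) := by
    conv_lhs => rw [show L = (L-1)+1 by omega]
    rw [pow_succ]; ring
  have := ten_pow_pos (L-1)
  omega

lemma repu_mono {a b : Nat} (h : a ≤ b) : repu a ≤ repu b := by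
  induction b with
  | zero => simp_all
  | succ b ih =>
    rcases Nat.lt_or_ge a (b+1) with hl | hg
    · have := ih (by omega)
      have := repu_nonneg b
      simp [repu]; omega
    · have : a = b + 1 := by omega
      simp [this]


lemma rd_ge {e : Int} (ℓ : Nat) (he : 1 ≤ e) : repu ℓ ≤ rd e ℓ :=
  le_mul_of_one_le_left (repu_nonneg ℓ) he

lemma rd_le {e : Int} (ℓ : Nat) (he : e ≤ 9) : rd e ℓ ≤ 9 * repu ℓ :=
  mul_le_mul_of_nonneg_right he (repu_nonneg ℓ)

lemma rd_mono {e f : Int} (ℓ : Nat) (h : e ≤ f) : rd e ℓ ≤ rd f ℓ :=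
  mul_le_mul_of_nonneg_right h (repu_nonneg ℓ)

def Good (n x : Int) : Prop :=
  1 ≤ x ∧ x ≤ n ∧ n - x < x ∧
    ∀ (e : Int) (ℓ : Nat), 1 ≤ e → e ≤ 9 → 1 ≤ ℓ → x < rd e ℓ → n < rd e ℓ

-- small repdigits are below 10^(L-1)
lemma rd_small {e : Int} {ℓ L : Nat} (he : e ≤ 9) (h : ℓ < L) :
    rd e ℓ < 10 ^ (L - 1) := by
  have h1 := rd_le ℓ he
  have h2 := nine_repu ℓ
  have h3 : (10:Int) ^ ℓ ≤ 10 ^ (L-1) := pow_le_pow_right₀ (by norm_num) (by omega)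
  omega

-- large repdigits exceed 10^L - wait we need: ℓ > L → repu ℓ ≥ 10*10^(L-1)+... 
lemma rd_big {e : Int} {ℓ L : Nat} (he : 1 ≤ e) (h : L < ℓ) (hL : 1 ≤ L) :
    10 * 10 ^ (L - 1) < rd e ℓ := by
  have h1 := rd_ge ℓ he
  have h2 : repu (L+1) ≤ repu ℓ := repu_mono (by omega)
  have h3 : repu (L+1) = 10 * repu L + 1 := rfl
  have h4 := pow_le_repu hL
  omega

lemma key1 {n d : Int} {L : Nat} (hd1 : 1 ≤ d) (hd9 : d ≤ 9) (hL : 1 ≤ L)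
    (hlo : d * 10 ^ (L-1) ≤ n) (hhi : n < (d+1) * 10 ^ (L-1))
    (hx : rd d L ≤ n) : Good n (rd d L) := by
  have hpr := pow_le_repu hL
  have hp1 := ten_pow_pos (L-1)
  have hxge : repu L ≤ rd d L := rd_ge L hd1
  refine ⟨by omega, hx, ?_, ?_⟩
  · -- n - x < x: n < (d+1)*10^(L-1) ≤ (d+1)*repu L = x + repu L ≤ 2x
    have h1 : (d+1) * 10^(L-1) ≤ (d+1) * repu L :=
      mul_le_mul_of_nonneg_left hpr (by omega)
    have h2 : (d+1) * repu L = rd d L + repu L := by unfold rd; ring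
    omega
  · intro e ℓ he1 he9 hℓ hgt
    rcases lt_trichotomy ℓ L with hc | hc | hc
    · exact absurd hgt (by have := rd_small he9 hc; omega)
    · subst hc
      have : d < e := by
        have := repu_pos hL
        unfold rd at hgt
        exact lt_of_mul_lt_mul_right (by omega) (repu_nonneg ℓ)
      have h1 : rd (d+1) ℓ ≤ rd e ℓ := rd_mono ℓ (by omega)
      have h2 : (d+1) * 10^(ℓ-1) ≤ (d+1) * repu ℓ :=
        mul_le_mul_of_nonneg_left (pow_le_repu hℓ) (by omega)
      have h3 : rd (d+1) ℓ = (d+1) * repu ℓ := rfl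
      omega
    · have h1 := rd_big he1 hc hL
      have h2 : (d+1) * 10^(L-1) ≤ 10 * 10^(L-1) :=
        mul_le_mul_of_nonneg_right (by omega) (by have := ten_pow_pos (L-1); omega)
      omega

lemma key2 {n d : Int} {L : Nat} (hd2 : 2 ≤ d) (hd9 : d ≤ 9) (hL : 1 ≤ L)
    (hlo : d * 10 ^ (L-1) ≤ n) (hx : n < rd d L) : Good n (rd (d-1) L) := by
  have hpr := pow_le_repu hL
  have hp1 := ten_pow_pos (L-1)
  have hxge : repu L ≤ rd (d-1) L := rd_ge L (by omega)
  have hle : rd (d-1) L ≤ n := by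
    -- (d-1)*repu L ≤ d*10^(L-1): 9((d-1) repu) = (d-1)(10^L - 1); 10^L = 10 * 10^(L-1)
    have h9 := nine_repu L
    have h10 : (10:Int)^L = 10 * 10^(L-1) := by
      conv_lhs => rw [show L = (L-1)+1 by omega]; rw [pow_succ]
      ring
    have : 9 * rd (d-1) L = (d-1) * (10 * 10^(L-1) - 1) := by
      unfold rd; rw [← h10, ← h9]; ring
    nlinarith [hp1]
  refine ⟨by omega, hle, ?_, ?_⟩
  · have h2 : rd d L = rd (d-1) L + repu L := by unfold rd; ring
    omega
  · intro e ℓ he1 he9 hℓ hgt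
    rcases lt_trichotomy ℓ L with hc | hc | hc
    · exact absurd hgt (by have := rd_small he9 hc; omega)
    · subst hc
      have : d - 1 < e := by
        have := repu_pos hℓ
        unfold rd at hgt
        exact lt_of_mul_lt_mul_right (by omega) (repu_nonneg ℓ)
      have h1 : rd d ℓ ≤ rd e ℓ := rd_mono ℓ (by omega)
      omega
    · have h1 := rd_big he1 hc hL
      have h2 : rd d L ≤ 9 * repu L := rd_le L hd9
      have h3 := nine_repu L
      have h4 : (10:Int)^L = 10 * 10^(L-1) := by
        conv_lhs => rw [show L = (L-1)+1 by omega]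
        rw [pow_succ]; ring
      omega

lemma key3 {n : Int} {L : Nat} (hL : 1 ≤ L)
    (hlo : 10 ^ (L-1) ≤ n) (hhi : n < 2 * 10 ^ (L-1))
    (hx : n < rd 1 L) : 2 ≤ L ∧ Good n (rd 9 (L-1)) := by
  have hpr := pow_le_repu hL
  have hp1 := ten_pow_pos (L-1)
  have hL2 : 2 ≤ L := by
    by_contra h
    have : L = 1 := by omega
    subst this
    simp [rd, repu] at hx
    omega
  have hL1 : 1 ≤ L - 1 := by omega
  have h9 : 9 * repu (L-1) = 10^(L-1) - 1 := nine_repu (L-1)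
  have hxval : rd 9 (L-1) = 9 * repu (L-1) := by unfold rd; ring
  have hep := repu_pos hL1
  refine ⟨hL2, by omega, by omega, ?_, ?_⟩
  · -- n - x < x : n < 2*(10^(L-1) - 1)? we have n < repu L = 10*repu(L-1)+1
    have : rd 1 L = repu L := by unfold rd; ring
    have hrl : repu L = 10 * repu (L-1) + 1 := by
      conv_lhs => rw [show L = (L-1)+1 by omega]
      rfl
    have := repu_pos hL1
    omega
  · intro e ℓ he1 he9 hℓ hgt
    rcases Nat.lt_or_ge ℓ L with hc | hc
    · -- ℓ ≤ L-1: rd e ℓ ≤ 9 repu ℓ ≤ 9 repu (L-1) = x: contradiction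
      have h1 := rd_le ℓ he9
      have h2 : repu ℓ ≤ repu (L-1) := repu_mono (by omega)
      omega
    · -- ℓ ≥ L: rd e ℓ ≥ repu ℓ ≥ repu L > n
      have h1 := rd_ge ℓ he1
      have h2 : repu L ≤ repu ℓ := repu_mono hc
      have : rd 1 L = repu L := by unfold rd; ring
      omega

-- ===== string side =====
lemma toDigitsCore_eq : ∀ (fuel m : Nat) (acc : List Char), 0 < m → m < fuel →
    Nat.toDigitsCore 10 fuel m acc = ((Nat.digits 10 m).reverse.map Nat.digitChar) ++ acc := by
  intro fuel
  induction fuel with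
  | zero => intro m acc h1 h2; omega
  | succ f ih =>
    intro m acc h1 h2
    rw [Nat.toDigitsCore]
    have hd : Nat.digits 10 m = m % 10 :: Nat.digits 10 (m / 10) :=
      Nat.digits_def' (by norm_num) h1
    by_cases h : m / 10 = 0
    · simp [h, hd]
    · simp only [h, if_false]
      rw [ih (m/10) _ (Nat.pos_of_ne_zero h) (by omega)]
      simp [hd]

lemma toChars_pos {n : Int} (h : 0 < n) :
    PySem.Int.toChars n = ((Nat.digits 10 n.toNat).reverse.map Nat.digitChar) ++ [] := by
  rw [PySem.Int.toChars]
  rw [if_neg (by omega)]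
  exact toDigitsCore_eq (n.toNat + 1) n.toNat [] (by omega) (by omega)


lemma digit_bounds {m : Nat} (hm : 0 < m) :
    ∀ (hne : Nat.digits 10 m ≠ []),
    let L := (Nat.digits 10 m).length
    let g := (Nat.digits 10 m).getLast hne
    1 ≤ g ∧ g ≤ 9 ∧ 1 ≤ L ∧ g * 10^(L-1) ≤ m ∧ m < (g+1) * 10^(L-1) := by
  intro hne L g
  have hglt : g < 10 := Nat.digits_lt_base (by norm_num) (List.getLast_mem hne)
  have hgne : g ≠ 0 := Nat.getLast_digit_ne_zero 10 (by omega)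
  have hL : 1 ≤ L := by
    have := List.length_pos_iff.mpr hne
    omega
  have hsplit : Nat.digits 10 m = (Nat.digits 10 m).dropLast ++ [g] :=
    (List.dropLast_append_getLast hne).symm
  have hlen : (Nat.digits 10 m).dropLast.length = L - 1 := by
    rw [List.length_dropLast]
  have hof : m = Nat.ofDigits 10 ((Nat.digits 10 m).dropLast) + 10^(L-1) * g := by
    conv_lhs => rw [← Nat.ofDigits_digits 10 m, hsplit]
    rw [Nat.ofDigits_append, Nat.ofDigits_singleton, hlen]
  have hlt : Nat.ofDigits 10 ((Nat.digits 10 m).dropLast) < 10^(L-1) := by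
    rw [← hlen]
    exact Nat.ofDigits_lt_base_pow_length (by norm_num)
      (fun x hx => Nat.digits_lt_base (by norm_num) (List.mem_of_mem_dropLast hx))
  have e1 : g * 10^(L-1) = 10^(L-1) * g := Nat.mul_comm _ _
  have e2 : (g+1) * 10^(L-1) = 10^(L-1) * g + 10^(L-1) := by ring
  refine ⟨by omega, by omega, hL, ?_, ?_⟩ <;> omega

lemma ofChars_replicate {d L : Nat} (hd1 : 1 ≤ d) (hd9 : d ≤ 9) (hL1 : 1 ≤ L) (hL10 : L ≤ 10) :
    PySem.Int.ofChars? (List.replicate L (Nat.digitChar d)) = some (rd (d : Int) L) := by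
  interval_cases d <;> interval_cases L <;> decide

lemma ofChars_single {d : Nat} (hd1 : 1 ≤ d) (hd9 : d ≤ 9) :
    PySem.Int.ofChars? [Nat.digitChar d] = some (d : Int) := by
  interval_cases d <;> decide

lemma toChars_small {a : Int} (h1 : 1 ≤ a) (h9 : a ≤ 9) :
    PySem.Int.toChars a = [Nat.digitChar a.toNat] := by
  interval_cases a <;> decide

def bstep (st : Int × List Int) (r : Int) : Int × List Int :=
  if r ≤ st.1 then (st.1 - r, st.2 ++ [r]) else st

def fullList (Lmax : Nat) : List Int :=
  (PySem.List.pyRange (Lmax : Int) 0 (-1)).flatMap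
    (fun L => (PySem.List.pyRange 9 0 (-1)).map (fun d => rd d L.toNat))

lemma mem_fullList {Lmax : Nat} {r : Int} :
    r ∈ fullList Lmax ↔ ∃ (e : Int) (ℓ : Nat), 1 ≤ e ∧ e ≤ 9 ∧ 1 ≤ ℓ ∧ ℓ ≤ Lmax ∧ r = rd e ℓ := by
  simp only [fullList, List.mem_flatMap, List.mem_map, PySem.List.mem_pyRange_neg_one]
  constructor
  · rintro ⟨L, ⟨hL0, hLm⟩, e, ⟨he0, he9⟩, rfl⟩
    exact ⟨e, L.toNat, by omega, by omega, by omega, by omega, rfl⟩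
  · rintro ⟨e, ℓ, he1, he9, hℓ1, hℓm, rfl⟩
    exact ⟨(ℓ : Int), ⟨by omega, by omega⟩, e, ⟨by omega, by omega⟩, by simp⟩

lemma fullList_pos {Lmax : Nat} {r : Int} (h : r ∈ fullList Lmax) : 1 ≤ r := by
  obtain ⟨e, ℓ, he1, _, hℓ1, _, rfl⟩ := mem_fullList.mp h
  have := rd_ge ℓ he1
  have := repu_pos hℓ1
  omega

lemma fullList_sorted (Lmax : Nat) : (fullList Lmax).Pairwise (· > ·) := by
  induction Lmax with
  | zero => simp [fullList, PySem.List.pyRange_neg_one_eq_nil]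
  | succ K ih =>
    have hcons : PySem.List.pyRange ((K+1 : Nat) : Int) 0 (-1)
        = ((K+1 : Nat) : Int) :: PySem.List.pyRange (((K+1 : Nat) : Int) - 1) 0 (-1) :=
      PySem.List.pyRange_neg_one_cons (by omega)
    have hc2 : (((K+1 : Nat) : Int) - 1) = (K : Int) := by omega
    unfold fullList
    rw [hcons, hc2, List.flatMap_cons, List.pairwise_append]
    refine ⟨?_, ih, ?_⟩
    · -- the block for length K+1 is strictly descending
      have h9 : PySem.List.pyRange 9 0 (-1) = [9,8,7,6,5,4,3,2,1] := by decide
      rw [h9]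
      have hr := repu_pos (show 1 ≤ ((K+1:Nat):Int).toNat by omega)
      have hp : ([9,8,7,6,5,4,3,2,1] : List Int).Pairwise (· > ·) := by decide
      refine hp.map (fun d => rd d (((K+1:Nat):Int).toNat)) (fun a b hab => ?_)
      show rd b _ < rd a _
      unfold rd
      exact mul_lt_mul_of_pos_right hab (by omega)
    · intro x hx y hy
      simp only [List.mem_map, PySem.List.mem_pyRange_neg_one] at hx
      obtain ⟨e, ⟨he0, he9⟩, rfl⟩ := hx
      obtain ⟨f, ℓ, hf1, hf9, hℓ1, hℓK, rfl⟩ := mem_fullList.mp hy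
      have hsm : rd f ℓ < 10 ^ (((K+1:Nat):Int).toNat - 1) := rd_small hf9 (by omega)
      have hge : (10:Int) ^ (((K+1:Nat):Int).toNat - 1) ≤ repu (((K+1:Nat):Int).toNat) :=
        pow_le_repu (by omega)
      have := rd_ge (((K+1:Nat):Int).toNat) (show (1:Int) ≤ e by omega)
      omega

lemma scan_skip : ∀ (l : List Int) (st : Int × List Int), (∀ r ∈ l, st.1 < r) →
    l.foldl bstep st = st := by
  intro l
  induction l with
  | nil => intro st _; rfl
  | cons a t ih =>
    intro st h
    have ha := h a (by simp)
    simp only [List.foldl_cons, bstep]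
    rw [if_neg (by omega)]
    exact ih st (fun r hr => h r (by simp [hr]))

lemma scan_focus : ∀ (l : List Int) (n x : Int) (ans : List Int),
    l.Pairwise (· > ·) → x ∈ l → (∀ r ∈ l, x < r → n < r) → x ≤ n → n - x < x →
    l.foldl bstep (n, ans) = l.foldl bstep (n - x, ans ++ [x]) := by
  intro l
  induction l with
  | nil => intro n x ans _ hmem; simp at hmem
  | cons a t ih =>
    intro n x ans hpw hmem hgt hle hlt
    rcases List.mem_cons.mp hmem with rfl | hmt
    · simp only [List.foldl_cons, bstep]
      rw [if_pos hle, if_neg (by omega)]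
    · have hax : x < a := (List.pairwise_cons.mp hpw).1 x hmt
      have hna : n < a := hgt a (by simp) hax
      simp only [List.foldl_cons, bstep]
      rw [if_neg (by omega), if_neg (by omega)]
      exact ih n x ans (List.pairwise_cons.mp hpw).2 hmt
        (fun r hr h => hgt r (by simp [hr]) h) hle hlt

lemma solveLoop_nonpos (fuel : Nat) (n : Int) (ans : List Int) (h : ¬ n > 0) :
    solveLoop fuel n ans = ans := by
  cases fuel <;> simp [solveLoop, h]

lemma floordiv_rep (t : Nat) : PySem.Int.floordiv (10 ^ t - 1) 9 = repu t := by
  rw [← nine_repu t, PySem.Int.floordiv_eq_ediv_of_pos (by norm_num)]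
  exact Int.mul_ediv_cancel_left _ (by norm_num)

lemma pyGet?_zero_cons {α : Type} (a : α) (t : List α) :
    PySem.List.pyGet? (a :: t) 0 = some a := by
  simp [pysem]

lemma alt_eq_scan (n k : Int) (h : 0 < n) :
    solve_alt n k = ((fullList ((PySem.Int.toChars n).length)).foldl bstep (n, [])).2 := by
  unfold solve_alt
  rw [if_neg (by omega)]
  have hfn : (fun (st : Int × List Int) (L : Int) =>
        let rep := PySem.Int.floordiv (10 ^ L.toNat - 1) 9
        (PySem.List.pyRange 9 0 (-1)).foldl
          (fun st d => let r := d * rep; if r ≤ st.1 then (st.1 - r, st.2 ++ [r]) else st) st)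
      = (fun (st : Int × List Int) (L : Int) =>
        ((PySem.List.pyRange 9 0 (-1)).map (fun d => rd d L.toNat)).foldl bstep st) := by
    funext st L
    rw [List.foldl_map]
    simp only [floordiv_rep, bstep, rd]
  rw [hfn]
  unfold fullList
  rw [List.foldl_flatMap]

lemma step_rhs {n x : Int} {Lmax : Nat} (ans : List Int) (hGood : Good n x)
    (hmem : x ∈ fullList Lmax) :
    (fullList Lmax).foldl bstep (n, ans) = (fullList Lmax).foldl bstep (n - x, ans ++ [x]) := by
  obtain ⟨hx1, hxle, hxlt, hgt⟩ := hGood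
  have hgt' : ∀ r ∈ fullList Lmax, x < r → n < r := by
    intro r hr hxr
    obtain ⟨e, ℓ, he1, he9, hℓ1, _, rfl⟩ := mem_fullList.mp hr
    exact hgt e ℓ he1 he9 hℓ1 hxr
  exact scan_focus _ n x ans (fullList_sorted Lmax) hmem hgt' hxle (by omega)

lemma main_lemma : ∀ (m : Nat), ∀ (fuel : Nat) (n : Int) (ans : List Int) (Lmax : Nat),
    n.toNat = m → m ≤ fuel → 0 < n → n < 10 ^ Lmax → Lmax ≤ 10 →
    solveLoop fuel n ans = ((fullList Lmax).foldl bstep (n, ans)).2 := by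
  intro m
  induction m using Nat.strong_induction_on with
  | _ m IH =>
  intro fuel n ans Lmax hm hfuel hn hnL hLm10
  have hm1 : 1 ≤ m := by omega
  obtain ⟨f, rfl⟩ : ∃ f, fuel = f + 1 := ⟨fuel - 1, by omega⟩
  have hne : Nat.digits 10 n.toNat ≠ [] := Nat.digits_ne_nil_iff_ne_zero.mpr (by omega)
  obtain ⟨hg1, hg9, hL1, hlo, hhi⟩ := digit_bounds (m := n.toNat) (by omega) hne
  set ds := Nat.digits 10 n.toNat with hds
  set L := ds.length with hLdef
  set g := ds.getLast hne with hgdef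
  have hcast : ((n.toNat : Int)) = n := Int.toNat_of_nonneg (by omega)
  have hloZ : (g : Int) * 10 ^ (L - 1) ≤ n := by
    have := hlo; rw [← hcast]; exact_mod_cast this
  have hhiZ : n < ((g : Int) + 1) * 10 ^ (L - 1) := by
    have := hhi; rw [← hcast]; exact_mod_cast this
  have hnLnat : n.toNat < 10 ^ Lmax := by
    have hc : ((10:Int)) ^ Lmax = ((10 ^ Lmax : Nat) : Int) := by push_cast; ring
    omega
  have hLle : L ≤ Lmax := by
    rw [hLdef, hds]
    refine (Nat.digits_length_le_iff (by norm_num) _).mpr ?_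
    have : ((10:Int)) ^ Lmax = ((10 ^ Lmax : Nat) : Int) := by push_cast; ring
    omega
  have hL10 : L ≤ 10 := le_trans hLle hLm10
  -- string evaluation
  have hcs : PySem.Int.toChars n = ds.reverse.map Nat.digitChar := by
    rw [toChars_pos hn]; simp [hds]
  obtain ⟨rest, hrev⟩ : ∃ rest, ds.reverse = g :: rest := by
    have hne' : ds.reverse ≠ [] := by simpa using hne
    refine ⟨ds.reverse.tail, ?_⟩
    rw [hgdef, List.getLast_eq_head_reverse hne]
    exact (List.cons_head_tail hne').symm
  have hhead : ds.reverse = g :: rest := hrev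
  have hget : PySem.List.pyGet? (PySem.Int.toChars n) 0 = some (Nat.digitChar g) := by
    rw [hcs, hhead, List.map_cons]
    exact pyGet?_zero_cons _ _
  have hlen : ((PySem.Int.toChars n).length : Int) = (L : Int) := by
    rw [hcs, List.length_map, List.length_reverse]
  have hx : (PySem.Int.ofChars? (PySem.List.pyRepeat [Nat.digitChar g]
      ((PySem.Int.toChars n).length : Int))).getD 0 = rd (g : Int) L := by
    rw [hlen, PySem.List.pyRepeat_singleton]
    rw [show ((L:Int)).toNat = L by omega]
    rw [ofChars_replicate hg1 hg9 hL1 hL10]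
    rfl
  -- continuation helper
  have hcont : ∀ (x : Int), Good n x → x ∈ fullList Lmax →
      solveLoop f (n - x) (ans ++ [x]) = ((fullList Lmax).foldl bstep (n, ans)).2 := by
    intro x hGood hmem
    rw [step_rhs ans hGood hmem]
    obtain ⟨hx1, hxle, hxlt, _⟩ := hGood
    rcases eq_or_lt_of_le (show (0:Int) ≤ n - x by omega) with h0 | h0
    · rw [solveLoop_nonpos f (n - x) _ (by omega)]
      rw [scan_skip _ _ (fun r hr => by have := fullList_pos hr; show n - x < r; omega)]
    · exact IH (n - x).toNat (by omega) f (n - x) (ans ++ [x]) Lmax rfl (by omega) h0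
        (by omega) hLm10
  -- one step of the loop
  rw [show solveLoop (f + 1) n ans =
      (if rd (g:Int) L ≤ n then
        solveLoop f (n - rd (g:Int) L) (ans ++ [rd (g:Int) L])
      else
        let s1 := (PySem.Int.ofChars? [Nat.digitChar g]).getD 0 - 1
        let p := if s1 = 0 then ((9 : Int), ((PySem.Int.toChars n).length : Int) - 1)
                 else (s1, ((PySem.Int.toChars n).length : Int))
        let y := (PySem.Int.ofChars? (PySem.List.pyRepeat (PySem.Int.toChars p.1) p.2)).getD 0
        solveLoop f (n - y) (ans ++ [y])) from by
    simp only [solveLoop, if_pos hn, hget, hx]]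
  by_cases hble : rd (g:Int) L ≤ n
  · rw [if_pos hble]
    exact hcont _ (key1 (by omega) (by omega) hL1 hloZ hhiZ hble)
      (mem_fullList.mpr ⟨(g:Int), L, by omega, by omega, hL1, hLle, rfl⟩)
  · rw [if_neg hble]
    have hs1 : (PySem.Int.ofChars? [Nat.digitChar g]).getD 0 - 1 = (g : Int) - 1 := by
      rw [ofChars_single hg1 hg9]; rfl
    simp only [hs1]
    by_cases hgone : (g : Int) - 1 = 0
    · -- leading digit 1: borrow to nines of length L-1
      have hgeq : (g : Int) = 1 := by omega
      rw [hgeq] at hloZ hhiZ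
      rw [hgeq] at hble
      obtain ⟨hL2, hGood⟩ := key3 (n := n) (L := L) hL1 (by omega) (by omega) (by omega)
      rw [if_pos hgone]
      have hy : (PySem.Int.ofChars? (PySem.List.pyRepeat (PySem.Int.toChars 9)
          (((PySem.Int.toChars n).length : Int) - 1))).getD 0 = rd 9 (L - 1) := by
        rw [toChars_small (by norm_num) (by norm_num), hlen, PySem.List.pyRepeat_singleton]
        rw [show ((L:Int) - 1).toNat = L - 1 by omega]
        rw [show ((9:Int)).toNat = 9 by rfl]
        rw [ofChars_replicate (by norm_num) (by norm_num) (by omega) (by omega)]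
        rfl
      simp only [hy]
      exact hcont _ hGood
        (mem_fullList.mpr ⟨9, L - 1, by omega, by omega, by omega, by omega, rfl⟩)
    · -- decrement the leading digit
      rw [if_neg hgone]
      have hGood := key2 (show 2 ≤ (g:Int) by omega) (by omega) hL1 hloZ (by omega)
      have hy : (PySem.Int.ofChars? (PySem.List.pyRepeat (PySem.Int.toChars ((g:Int) - 1))
          ((PySem.Int.toChars n).length : Int))).getD 0 = rd ((g:Int) - 1) L := by
        rw [toChars_small (by omega) (by omega), hlen, PySem.List.pyRepeat_singleton]
        rw [show ((L:Int)).toNat = L by omega]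
        rw [show ((g:Int) - 1).toNat = g - 1 by omega]
        rw [ofChars_replicate (by omega) (by omega) hL1 hL10,
            show ((g - 1 : Nat) : Int) = (g : Int) - 1 by omega]
        rfl
      simp only [hy]
      exact hcont _ hGood
        (mem_fullList.mpr ⟨(g:Int) - 1, L, by omega, by omega, hL1, hLle, rfl⟩)

theorem solve_eq_alt (n k : Int) (hd : Dom_solve n k) : solve n k = solve_alt n k := by
  by_cases hn : 0 < n
  · have hbound : n ≤ 2147483648 := by
      simp only [Dom_solve, pvDomInt, Bool.and_eq_true, decide_eq_true_eq] at hd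
      exact hd.1.2
    rw [alt_eq_scan n k hn]
    have hlen : (PySem.Int.toChars n).length = (Nat.digits 10 n.toNat).length := by
      rw [toChars_pos hn]; simp
    refine main_lemma n.toNat (n.toNat + 1) n [] _ rfl (by omega) hn ?_ ?_
    · rw [hlen]
      have h1 := Nat.lt_base_pow_length_digits (b := 10) (m := n.toNat) (by norm_num)
      have h2 : ((10 ^ (Nat.digits 10 n.toNat).length : Nat) : Int)
          = (10 : Int) ^ (Nat.digits 10 n.toNat).length := by push_cast; ring
      omega
    · rw [hlen]
      refine (Nat.digits_length_le_iff (by norm_num) _).mpr ?_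
      omega
  · unfold solve solve_alt
    rw [solveLoop_nonpos _ _ _ hn, if_pos (by omega)]

-- ===== VERDICT (by name: the statement is the Claim_ definition above) =====
theorem solve_spec : Claim_equal_solve := by
  intro n k hd
  unfold Spec_solve
  exact solve_eq_alt n k hd
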